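-- pv_equiv track=rewrite | github.com/sradco/cnv-epic-agent | agent/analyzer/formatter.py | _render_existing_table
-- ===== SOURCE A (Python) =====
-- def _render_existing_table(
--     items: list[dict[str, str]], category: str,
-- ) -> str:
--     """Render existing items as a markdown table."""
--     if not items:
--         return ""
--
--     if category == "metrics":
--         lines = ["| Metric | Type | Why relevant | Repo |",
--                  "|--------|------|-------------|------|"]
--         for it in items:
--             lines.append(
--                 f"| `{it.get('name', '')}` "
--                 f"| {it.get('type', '')} "
--                 f"| {it.get('rationale', '')} "
--                 f"| {it.get('repo', '')} |"
--             )
--     elif category == "alerts":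
--         lines = ["| Alert | Severity | Why relevant | Repo |",
--                  "|-------|----------|-------------|------|"]
--         for it in items:
--             lines.append(
--                 f"| `{it.get('name', '')}` "
--                 f"| {it.get('severity', '')} "
--                 f"| {it.get('rationale', '')} "
--                 f"| {it.get('repo', '')} |"
--             )
--     elif category == "dashboards":
--         lines = ["| Panel | Dashboard | Why relevant | Repo |",
--                  "|-------|-----------|-------------|------|"]
--         for it in items:
--             lines.append(
--                 f"| `{it.get('name', '')}` "
--                 f"| {it.get('dashboard', '')} "
--                 f"| {it.get('rationale', '')} "
--                 f"| {it.get('repo', '')} |"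
--             )
--     else:
--         lines = ["| Name | Why relevant | Repo |",
--                  "|------|-------------|------|"]
--         for it in items:
--             lines.append(
--                 f"| `{it.get('name', '')}` "
--                 f"| {it.get('rationale', '')} "
--                 f"| {it.get('repo', '')} |"
--             )
--
--     return "\n".join(lines)
-- ===== SOURCE B (Python) =====
-- _CONFIGS = {
--     "metrics": ("| Metric | Type | Why relevant | Repo |",
--                 "|--------|------|-------------|------|",
--                 ["type", "rationale", "repo"]),
--     "alerts": ("| Alert | Severity | Why relevant | Repo |",
--                "|-------|----------|-------------|------|",
--                ["severity", "rationale", "repo"]),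
--     "dashboards": ("| Panel | Dashboard | Why relevant | Repo |",
--                    "|-------|-----------|-------------|------|",
--                    ["dashboard", "rationale", "repo"]),
-- }
--
-- _DEFAULT = ("| Name | Why relevant | Repo |",
--             "|------|-------------|------|",
--             ["rationale", "repo"])
--
--
-- def _render_existing_table(items, category):
--     """Render existing items as a markdown table, built column by column.
--
--     The table body is assembled column-major: one column per field (the
--     name column backtick-wrapped), then transposed with zip(*) into rows.
--     """
--     if not items:
--         return ""
--     header, sep, keys = _CONFIGS.get(category, _DEFAULT)
--     columns = [["`%s`" % it.get("name", "") for it in items]]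
--     columns += [[it.get(k, "") for it in items] for k in keys]
--     rows = ["| " + " | ".join(cells) + " |" for cells in zip(*columns)]
--     return "\n".join([header, sep] + rows)
-- ===== Notes on version B (the rewrite author's own statement) =====
-- stated objective: alternative
-- what changed: B builds the table body column-major (one backtick-wrapped name column plus one column per configured field key, looked up in a category config table) and transposes the columns with zip(*) into rows, instead of A's four copy-pasted per-category loops each formatting a whole row at a time.
import Mathlib
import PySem

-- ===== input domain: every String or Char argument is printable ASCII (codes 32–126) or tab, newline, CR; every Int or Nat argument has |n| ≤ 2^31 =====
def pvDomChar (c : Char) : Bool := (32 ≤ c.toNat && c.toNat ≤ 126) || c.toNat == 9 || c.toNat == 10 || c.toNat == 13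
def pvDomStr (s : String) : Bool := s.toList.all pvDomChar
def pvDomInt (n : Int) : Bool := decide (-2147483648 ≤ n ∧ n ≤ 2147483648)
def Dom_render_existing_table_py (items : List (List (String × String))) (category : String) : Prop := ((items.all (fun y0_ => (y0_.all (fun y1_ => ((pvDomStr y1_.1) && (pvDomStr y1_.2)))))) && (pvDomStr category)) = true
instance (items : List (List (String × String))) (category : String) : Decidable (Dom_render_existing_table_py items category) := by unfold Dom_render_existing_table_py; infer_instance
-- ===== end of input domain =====

-- B builds the table body column-major (name column plus one column per configured field key) and transposes
-- the columns into rows with zip(*), instead of A's four copy-pasted per-category row-formatting loops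
-- (objective: alternative decomposition, same cost).

-- shared primitive: Python's it.get(k, '') on the association-list dict
def pvGet (it : List (String × String)) (k : String) : String :=
  (PySem.Dict.mk it).getD k ""

-- ===== PORT A =====
def render_existing_table_py (items : List (List (String × String))) (category : String) : String :=
  if items = [] then ""
  else
    let lines :=
      if category = "metrics" then
        items.foldl (fun acc it =>
          acc ++ ["| `" ++ pvGet it "name" ++ "` | " ++ pvGet it "type" ++ " | "
                    ++ pvGet it "rationale" ++ " | " ++ pvGet it "repo" ++ " |"])
          ["| Metric | Type | Why relevant | Repo |", "|--------|------|-------------|------|"]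
      else if category = "alerts" then
        items.foldl (fun acc it =>
          acc ++ ["| `" ++ pvGet it "name" ++ "` | " ++ pvGet it "severity" ++ " | "
                    ++ pvGet it "rationale" ++ " | " ++ pvGet it "repo" ++ " |"])
          ["| Alert | Severity | Why relevant | Repo |", "|-------|----------|-------------|------|"]
      else if category = "dashboards" then
        items.foldl (fun acc it =>
          acc ++ ["| `" ++ pvGet it "name" ++ "` | " ++ pvGet it "dashboard" ++ " | "
                    ++ pvGet it "rationale" ++ " | " ++ pvGet it "repo" ++ " |"])
          ["| Panel | Dashboard | Why relevant | Repo |", "|-------|-----------|-------------|------|"]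
      else
        items.foldl (fun acc it =>
          acc ++ ["| `" ++ pvGet it "name" ++ "` | " ++ pvGet it "rationale" ++ " | "
                    ++ pvGet it "repo" ++ " |"])
          ["| Name | Why relevant | Repo |", "|------|-------------|------|"]
    PySem.Str.join "\n" lines

-- ===== PORT B =====
def pvConfigs : PySem.Dict String (String × String × List String) :=
  PySem.Dict.mk
    [("metrics", ("| Metric | Type | Why relevant | Repo |",
                  "|--------|------|-------------|------|",
                  ["type", "rationale", "repo"])),
     ("alerts", ("| Alert | Severity | Why relevant | Repo |",
                 "|-------|----------|-------------|------|",
                 ["severity", "rationale", "repo"])),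
     ("dashboards", ("| Panel | Dashboard | Why relevant | Repo |",
                     "|-------|-----------|-------------|------|",
                     ["dashboard", "rationale", "repo"]))]

def pvDefault : String × String × List String :=
  ("| Name | Why relevant | Repo |", "|------|-------------|------|", ["rationale", "repo"])

-- Python's zip(*columns): take the heads of all columns while every column is nonempty
def pvZipStar (cols : List (List String)) : List (List String) :=
  if h : cols ≠ [] ∧ cols.all (· ≠ []) then
    (cols.map (fun c => c.headD "")) :: pvZipStar (cols.map List.tail)
  else []
termination_by (cols.headD []).length
decreasing_by
  obtain ⟨hne, hall⟩ := h
  cases cols with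
  | nil => exact absurd rfl hne
  | cons c cs =>
    simp only [List.all_cons, Bool.and_eq_true] at hall
    cases c with
    | nil => simp at hall
    | cons x xs => simp

def render_existing_table_py_alt (items : List (List (String × String))) (category : String) : String :=
  if items = [] then ""
  else
    let cfg := pvConfigs.getD category pvDefault
    let columns := (items.map (fun it => "`" ++ pvGet it "name" ++ "`"))
                     :: cfg.2.2.map (fun k => items.map (fun it => pvGet it k))
    let rows := (pvZipStar columns).map (fun cells => "| " ++ PySem.Str.join " | " cells ++ " |")
    PySem.Str.join "\n" ([cfg.1, cfg.2.1] ++ rows)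

-- ===== PRECONDITION & SPEC =====
def Spec_render_existing_table_py (items : List (List (String × String))) (category : String) (out : String) : Prop := out = render_existing_table_py_alt items category
instance (items : List (List (String × String))) (category : String) (out : String) : Decidable (Spec_render_existing_table_py items category out) := by unfold Spec_render_existing_table_py; infer_instance

-- ===== CLAIM (what is proved, stated in full; the proofs are below) =====
def Claim_equal_render_existing_table_py : Prop := ∀ (items : List (List (String × String))) (category : String), Dom_render_existing_table_py items category → Spec_render_existing_table_py items category (render_existing_table_py items category)

-- ===== LEMMAS AND PROOFS =====

-- transposing the column-major build gives the row-major table (4 and 3 columns)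
lemma pv_zipStar4 {α : Type} (f g1 g2 g3 : α → String) (items : List α) :
    pvZipStar [items.map f, items.map g1, items.map g2, items.map g3]
      = items.map (fun it => [f it, g1 it, g2 it, g3 it]) := by
  induction items with
  | nil => rw [pvZipStar]; simp
  | cons it rest ih => rw [pvZipStar]; simp [ih]

lemma pv_zipStar3 {α : Type} (f g1 g2 : α → String) (items : List α) :
    pvZipStar [items.map f, items.map g1, items.map g2]
      = items.map (fun it => [f it, g1 it, g2 it]) := by
  induction items with
  | nil => rw [pvZipStar]; simp
  | cons it rest ih => rw [pvZipStar]; simp [ih]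

lemma pv_flatten_map_singleton {α β : Type} (f : α → β) (l : List α) :
    (List.map (fun x => [f x]) l).flatten = l.map f := by
  induction l with
  | nil => rfl
  | cons x xs ih => simp [ih]

-- A's 4-cell f-string row equals B's joined-cells row
lemma pv_row4 (n a b c : String) :
    "| `" ++ n ++ "` | " ++ a ++ " | " ++ b ++ " | " ++ c ++ " |"
      = "| " ++ PySem.Str.join " | " (("`" ++ n ++ "`") :: [a, b, c]) ++ " |" := by
  rw [← String.toList_inj]
  simp [PySem.Str.join, PySem.Chars.join, List.intercalate, List.intersperse]

-- A's 3-cell f-string row equals B's joined-cells row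
lemma pv_row3 (n a b : String) :
    "| `" ++ n ++ "` | " ++ a ++ " | " ++ b ++ " |"
      = "| " ++ PySem.Str.join " | " (("`" ++ n ++ "`") :: [a, b]) ++ " |" := by
  rw [← String.toList_inj]
  simp [PySem.Str.join, PySem.Chars.join, List.intercalate, List.intersperse]

-- ===== VERDICT (by name: the statement is the Claim_ definition above) =====
theorem render_existing_table_py_spec : Claim_equal_render_existing_table_py := by
  intro items category _
  unfold Spec_render_existing_table_py render_existing_table_py render_existing_table_py_alt
  by_cases h0 : items = []
  · simp [h0]
  · simp only [h0, if_false]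
    by_cases h1 : category = "metrics"
    · simp [h1, pvConfigs, PySem.Dict.getD_eq_get?_getD, PySem.Dict.get?_mk_cons,
        pv_zipStar4, pv_flatten_map_singleton, pv_row4, Function.comp_def]
    · by_cases h2 : category = "alerts"
      · simp [h2, pvConfigs, PySem.Dict.getD_eq_get?_getD, PySem.Dict.get?_mk_cons,
          pv_zipStar4, pv_flatten_map_singleton, pv_row4, Function.comp_def]
      · by_cases h3 : category = "dashboards"
        · simp [h3, pvConfigs, PySem.Dict.getD_eq_get?_getD, PySem.Dict.get?_mk_cons,
            pv_zipStar4, pv_flatten_map_singleton, pv_row4, Function.comp_def]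
        · simp [h1, h2, h3, pvConfigs, pvDefault,
            PySem.Dict.getD_eq_get?_getD, PySem.Dict.get?,
            pv_zipStar3, pv_flatten_map_singleton, pv_row3, Function.comp_def,
            Ne.symm h1, Ne.symm h2, Ne.symm h3]
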